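-- pv_equiv track=rewrite | github.com/catherine-00/lgu6p | lab01/bioinfo/bioinfo.midterm.201911071.이민진.py | calc_restrict_fragment_size_v2
-- ===== SOURCE A (Python) =====
-- def calc_restrict_fragment_size_v2(dna, enz):
--     # +++your code here+++
--     delet=enz.replace("*","")
--     all=dna.replace(delet,enz)
--     frag=all.split("*")
--     size=[]
--     i=0
--     for i in range(len(frag)):
--         size.append(len(frag[i]))
--     return size
--
--
--
--     pass
-- ===== SOURCE B (Python) =====
-- def _merge(sizes, text):
--     # extend the running fragment-size list with the fragments of one more piece
--     # of text: '*' marks a cut, everything else lengthens the open fragment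
--     parts = text.split('*')
--     sizes[-1] += len(parts[0])
--     sizes.extend(len(p) for p in parts[1:])
--
--
-- def calc_restrict_fragment_size_v2(dna, enz):
--     # The digested sequence is the enzyme pattern glued between the pieces of dna
--     # around each recognition site; accumulate fragment sizes piece by piece
--     # instead of building and re-splitting the whole marked string.
--     site = enz.replace('*', '')
--     first, *rest = dna.split(site)
--     sizes = [0]
--     _merge(sizes, first)
--     for seg in rest:
--         _merge(sizes, enz)
--         _merge(sizes, seg)
--     return sizes
-- ===== Notes on version B (the rewrite author's own statement) =====
-- stated objective: alternative
-- what changed: B never builds the marked string: it splits dna on the recognition site and accumulates fragment sizes by merging the size lists of the alternating dna pieces and enzyme-pattern copies; Pre_ excludes enz consisting only of '*' characters (including the empty string), where the recognition site is empty so A's empty-pattern str.replace inserts markers at every gap while B's str.split('') raises ValueError.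
-- outside the precondition, e.g. on calc_restrict_fragment_size_v2('AB', '*'): A returns [0, 1, 1, 0], B raises ValueError; on calc_restrict_fragment_size_v2('AB', ''): A returns [2], B raises ValueError
import Mathlib
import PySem

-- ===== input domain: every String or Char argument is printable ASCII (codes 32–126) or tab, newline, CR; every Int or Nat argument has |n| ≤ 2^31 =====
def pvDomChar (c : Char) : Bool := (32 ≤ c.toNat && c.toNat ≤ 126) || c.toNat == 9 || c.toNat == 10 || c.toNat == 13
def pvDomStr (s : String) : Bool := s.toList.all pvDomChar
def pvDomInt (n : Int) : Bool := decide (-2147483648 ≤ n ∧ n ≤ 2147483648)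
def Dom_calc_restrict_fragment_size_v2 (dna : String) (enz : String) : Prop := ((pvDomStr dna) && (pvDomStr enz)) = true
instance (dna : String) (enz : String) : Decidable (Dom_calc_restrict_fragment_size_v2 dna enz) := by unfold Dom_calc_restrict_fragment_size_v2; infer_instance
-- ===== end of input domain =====

-- B never builds the marked string: it splits dna on the recognition site and merges
-- per-piece fragment-size lists (objective: alternative decomposition; equal on Pre_).


-- ===== PORT A =====
def calc_restrict_fragment_size_v2 (dna : String) (enz : String) : List Int :=
  let delet := PySem.Chars.replace enz.toList ['*'] []          -- delet = enz.replace("*","")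
  let all := PySem.Chars.replace dna.toList delet enz.toList    -- all = dna.replace(delet, enz)
  let frag := PySem.Chars.splitOn all ['*']                     -- frag = all.split("*")
  (PySem.List.pyRange 0 (frag.length : Int) 1).foldl            -- for i in range(len(frag)): size.append(len(frag[i]))
    (fun size i => size ++ [((PySem.Chars.len (PySem.List.pyGetD frag i [])) : Int)]) []

-- ===== PORT B =====
-- last element of the size list (sizes[-1]; Source B's list is always non-empty)
def pvLastI : List Int → Int
  | [] => 0
  | [x] => x
  | _ :: x :: xs => pvLastI (x :: xs)

-- _merge(sizes, text): sizes[-1] += len(parts[0]); sizes.extend(len(p) for p in parts[1:])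
def pvMerge (sizes : List Int) (text : List Char) : List Int :=
  let parts := PySem.Chars.splitOn text ['*']
  (sizes.dropLast ++ [pvLastI sizes + (PySem.Chars.len (parts.headD []) : Int)])
    ++ parts.tail.map (fun p => (PySem.Chars.len p : Int))

def calc_restrict_fragment_size_v2_alt (dna : String) (enz : String) : List Int :=
  let site := PySem.Chars.replace enz.toList ['*'] []           -- site = enz.replace('*','')
  let segs := PySem.Chars.splitOn dna.toList site               -- first, *rest = dna.split(site)
  let first := segs.headD []
  let rest := segs.tail
  rest.foldl (fun sizes seg => pvMerge (pvMerge sizes enz.toList) seg)   -- for seg in rest: _merge(enz); _merge(seg)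
    (pvMerge [0] first)                                         -- sizes = [0]; _merge(sizes, first)

-- ===== PRECONDITION & SPEC =====
-- Pre_ excludes enz consisting only of '*' characters (including ""): there the recognition
-- site is empty, A's empty-pattern str.replace inserts markers at every gap (an artefact of
-- the marker strategy) and B's str.split('') raises ValueError.
def Pre_calc_restrict_fragment_size_v2 (dna : String) (enz : String) : Prop :=
  enz.toList.any (fun c => c ≠ '*') = true
instance (dna : String) (enz : String) : Decidable (Pre_calc_restrict_fragment_size_v2 dna enz) := by
  unfold Pre_calc_restrict_fragment_size_v2; infer_instance

def pvWitness_calc_restrict_fragment_size_v2 : String × String := ("GAATTCAAGAATTC", "G*AATTC")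

def Spec_calc_restrict_fragment_size_v2 (dna : String) (enz : String) (out : List Int) : Prop := out = calc_restrict_fragment_size_v2_alt dna enz
instance (dna : String) (enz : String) (out : List Int) : Decidable (Spec_calc_restrict_fragment_size_v2 dna enz out) := by unfold Spec_calc_restrict_fragment_size_v2; infer_instance

-- ===== CLAIM (what is proved, stated in full; the proofs are below) =====
def Claim_equal_calc_restrict_fragment_size_v2 : Prop := ∀ (dna : String) (enz : String), Dom_calc_restrict_fragment_size_v2 dna enz → Pre_calc_restrict_fragment_size_v2 dna enz → Spec_calc_restrict_fragment_size_v2 dna enz (calc_restrict_fragment_size_v2 dna enz)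

-- ===== LEMMAS AND PROOFS =====

-- structural characterisation of PySem.Chars.replace for a non-empty pattern
def pvRep (old new : List Char) : List Char → List Char
  | [] => []
  | c :: t =>
    if old.isPrefixOf (c :: t) then new ++ pvRep old new (t.drop (old.length - 1))
    else c :: pvRep old new t
termination_by l => l.length
decreasing_by all_goals (simp only [List.length_drop, List.length_cons]; omega)

theorem pvRep_nil (old new : List Char) : pvRep old new [] = [] := by simp [pvRep]

theorem pvRep_cons (old new : List Char) (c : Char) (t : List Char) :
    pvRep old new (c :: t) =
      if old.isPrefixOf (c :: t) then new ++ pvRep old new (t.drop (old.length - 1))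
      else c :: pvRep old new t := by rw [pvRep]

-- structural characterisation of PySem.Chars.splitOn for a non-empty separator
def pvSplit (old : List Char) : List Char → List (List Char)
  | [] => [[]]
  | c :: t =>
    if old.isPrefixOf (c :: t) then [] :: pvSplit old (t.drop (old.length - 1))
    else (pvSplit old t).modifyHead (c :: ·)
termination_by l => l.length
decreasing_by all_goals (simp only [List.length_drop, List.length_cons]; omega)

theorem pvSplit_ne_nil (old : List Char) (l : List Char) : pvSplit old l ≠ [] := by
  induction l using pvSplit.induct old with
  | case1 => simp [pvSplit]
  | case2 c t h ih => simp [pvSplit, h]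
  | case3 c t h ih =>
    rw [pvSplit, if_neg h]
    cases hp : pvSplit old t with
    | nil => exact absurd hp ih
    | cons a b => simp

theorem pvSplitOn_go_eq (old : List Char) (h : old ≠ []) :
    ∀ (fuel : Nat) (l cur : List Char) (acc : List (List Char)), l.length < fuel →
      PySem.Chars.splitOn.go old fuel l cur acc
        = acc.reverse ++ (pvSplit old l).modifyHead (cur.reverse ++ ·) := by
  intro fuel
  induction fuel with
  | zero => intro l cur acc hl; omega
  | succ fuel ih =>
    intro l cur acc hl
    cases l with
    | nil => simp [PySem.Chars.splitOn.go, pvSplit]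
    | cons c t =>
      rw [pvSplit]
      simp only [PySem.Chars.splitOn.go]
      by_cases hp : old.isPrefixOf (c :: t)
      · rw [if_pos hp, if_pos hp, ih]
        · have hd : (c :: t).drop old.length = t.drop (old.length - 1) := by
            cases old with
            | nil => exact absurd rfl h
            | cons o os => simp
          rw [hd]
          cases hs : pvSplit old (t.drop (old.length - 1)) with
          | nil => exact absurd hs (pvSplit_ne_nil old _)
          | cons a b => simp
        · have ho : 1 ≤ old.length := by
            cases old with
            | nil => exact absurd rfl h
            | cons o os => simp
          simp at hl ⊢
          omega
      · rw [if_neg hp, if_neg hp, ih]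
        · cases hs : pvSplit old t with
          | nil => exact absurd hs (pvSplit_ne_nil old t)
          | cons a b => simp
        · simp at hl ⊢; omega

theorem pvSplitOn_eq_gen (l old : List Char) (h : old ≠ []) :
    PySem.Chars.splitOn l old = pvSplit old l := by
  unfold PySem.Chars.splitOn
  rw [pvSplitOn_go_eq old h (l.length + 1) l [] [] (by omega)]
  cases hs : pvSplit old l with
  | nil => exact absurd hs (pvSplit_ne_nil old l)
  | cons a b => simp

-- fragment sizes of a marked character list: lengths of its pieces between '*'s
def pvSizes : List Char → List Int
  | [] => [0]
  | c :: t => if c = '*' then 0 :: pvSizes t else (pvSizes t).modifyHead (fun x => 1 + x)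

-- bump the first entry by cur (the open fragment carried across pieces)
def pvAf (cur : Int) (l : List Int) : List Int := l.modifyHead (fun x => cur + x)

theorem pvSizes_ne_nil (l : List Char) : pvSizes l ≠ [] := by
  induction l with
  | nil => simp [pvSizes]
  | cons c t ih =>
    simp only [pvSizes]
    split
    · simp
    · cases h : pvSizes t with
      | nil => exact absurd h ih
      | cons a b => simp

theorem pvAf_zero (l : List Int) : pvAf 0 l = l := by
  cases l <;> simp [pvAf]

theorem pvAf_ne_nil (a : Int) (l : List Int) (h : l ≠ []) : pvAf a l ≠ [] := by
  cases l with
  | nil => exact absurd rfl h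
  | cons x xs => simp [pvAf]

theorem pvLastI_cons_cons (a b : Int) (l : List Int) : pvLastI (a :: b :: l) = pvLastI (b :: l) := by
  simp [pvLastI]

theorem pvLastI_append (u v : List Int) (h : v ≠ []) : pvLastI (u ++ v) = pvLastI v := by
  induction u with
  | nil => rfl
  | cons a u ih =>
    cases u with
    | nil =>
      cases v with
      | nil => exact absurd rfl h
      | cons b w => simp [pvLastI_cons_cons]
    | cons a2 u2 => rw [List.cons_append, List.cons_append, pvLastI_cons_cons, ← List.cons_append, ih]

theorem pvDropLast_append_lastI (l : List Int) (h : l ≠ []) : l.dropLast ++ [pvLastI l] = l := by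
  induction l with
  | nil => exact absurd rfl h
  | cons a t ih =>
    cases t with
    | nil => simp [pvLastI]
    | cons b u => rw [pvLastI_cons_cons, List.dropLast_cons₂, List.cons_append, ih (by simp)]

theorem pvRep_star_filter (l : List Char) : pvRep ['*'] [] l = l.filter (fun c => c ≠ '*') := by
  induction l with
  | nil => simp [pvRep]
  | cons c t ih =>
    simp only [pvRep, List.isPrefixOf, List.filter]
    by_cases hc : c = '*'
    · subst hc; simp [ih]
    · simp [hc, Ne.symm hc, ih]

theorem pvReplace_go_eq (old new : List Char) (h : old ≠ []) :
    ∀ (fuel : Nat) (l acc : List Char), l.length ≤ fuel →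
      PySem.Chars.replace.go old new fuel l acc = acc.reverse ++ pvRep old new l := by
  intro fuel
  induction fuel with
  | zero =>
    intro l acc hl
    cases l with
    | nil => simp [PySem.Chars.replace.go, pvRep_nil]
    | cons c t => simp at hl
  | succ fuel ih =>
    intro l acc hl
    cases l with
    | nil => simp [PySem.Chars.replace.go, pvRep_nil]
    | cons c t =>
      obtain ⟨o, os, rfl⟩ : ∃ o os, old = o :: os := by
        cases old with | nil => exact absurd rfl h | cons o os => exact ⟨o, os, rfl⟩
      rw [pvRep_cons]
      simp only [PySem.Chars.replace.go]
      by_cases hp : (o :: os).isPrefixOf (c :: t)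
      · rw [if_pos hp, if_pos hp, ih]
        · simp
        · simp at hl ⊢; omega
      · rw [if_neg hp, if_neg hp, ih]
        · simp
        · simp at hl ⊢; omega

theorem pvReplace_eq (s old new : List Char) (h : old ≠ []) :
    PySem.Chars.replace s old new = pvRep old new s := by
  unfold PySem.Chars.replace
  rw [if_neg (by simpa using h)]
  simpa using pvReplace_go_eq old new h s.length s [] le_rfl

-- splitting on '*' then measuring the pieces gives pvSizes
theorem pvMap_len_split_star (l : List Char) :
    (pvSplit ['*'] l).map (fun p => (p.length : Int)) = pvSizes l := by
  induction l with
  | nil => simp [pvSplit, pvSizes]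
  | cons c t ih =>
    rw [pvSplit, pvSizes]
    by_cases hc : c = '*'
    · subst hc
      rw [if_pos (by simp [List.isPrefixOf]), if_pos rfl]
      simp [ih]
    · rw [if_neg (by simp [List.isPrefixOf, Ne.symm hc]), if_neg hc]
      cases h : pvSplit ['*'] t with
      | nil => exact absurd h (pvSplit_ne_nil _ t)
      | cons a b =>
        rw [h] at ih
        simp only [List.modifyHead, List.map, ← ih]
        congr 1
        simp; omega

-- replacing old by new is gluing new between the split pieces
theorem pvRep_glue (old new : List Char) (l : List Char) :
    pvRep old new l
      = (pvSplit old l).headD [] ++ (((pvSplit old l).tail).map (fun s => new ++ s)).flatten := by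
  induction l using pvSplit.induct old with
  | case1 => simp [pvSplit, pvRep_nil]
  | case2 c t h ih =>
    rw [pvRep_cons, if_pos h, pvSplit, if_pos h, ih]
    cases hs : pvSplit old (t.drop (old.length - 1)) with
    | nil => exact absurd hs (pvSplit_ne_nil old _)
    | cons a b => simp
  | case3 c t h ih =>
    rw [pvRep_cons, if_neg h, pvSplit, if_neg h, ih]
    cases hs : pvSplit old t with
    | nil => exact absurd hs (pvSplit_ne_nil old t)
    | cons a b => simp

-- sizes of a concatenation: close the left part, carry its last open fragment
theorem pvCat (xs ys : List Char) :
    pvSizes (xs ++ ys) = (pvSizes xs).dropLast ++ pvAf (pvLastI (pvSizes xs)) (pvSizes ys) := by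
  induction xs with
  | nil => simp [pvSizes, pvLastI, pvAf_zero]
  | cons c t ih =>
    simp only [List.cons_append, pvSizes]
    by_cases hc : c = '*'
    · rw [if_pos hc, if_pos hc, ih]
      cases h : pvSizes t with
      | nil => exact absurd h (pvSizes_ne_nil t)
      | cons a b => simp [pvLastI_cons_cons]
    · rw [if_neg hc, if_neg hc, ih]
      cases h : pvSizes t with
      | nil => exact absurd h (pvSizes_ne_nil t)
      | cons a b =>
        cases b with
        | nil =>
          cases hy : pvSizes ys with
          | nil => exact absurd hy (pvSizes_ne_nil ys)
          | cons y yr => simp [pvAf, pvLastI, List.modifyHead]; ring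
        | cons a2 b2 => simp [pvAf, pvLastI_cons_cons, List.modifyHead]

-- the canonical "extend a closed size list by one more piece of text"
def pvExt (sizes : List Int) (xs : List Char) : List Int :=
  sizes.dropLast ++ pvAf (pvLastI sizes) (pvSizes xs)

theorem pvExt_ne_nil (sizes : List Int) (xs : List Char) : pvExt sizes xs ≠ [] := by
  unfold pvExt
  intro h
  rcases List.append_eq_nil_iff.mp h with ⟨-, h2⟩
  exact pvAf_ne_nil _ _ (pvSizes_ne_nil xs) h2

theorem pvMerge_eq (sizes : List Int) (text : List Char) :
    pvMerge sizes text = pvExt sizes text := by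
  unfold pvMerge pvExt
  rw [pvSplitOn_eq_gen text ['*'] (by simp)]
  have hm := pvMap_len_split_star text
  cases hs : pvSplit ['*'] text with
  | nil => exact absurd hs (pvSplit_ne_nil _ text)
  | cons p ps =>
    rw [hs] at hm
    rw [← hm]
    simp [pvAf, PySem.Chars.len_eq, List.modifyHead]

theorem pvExt_pvExt (sizes : List Int) (xs ys : List Char) :
    pvExt (pvExt sizes xs) ys = pvExt sizes (xs ++ ys) := by
  unfold pvExt
  rw [pvCat]
  have hne : pvAf (pvLastI sizes) (pvSizes xs) ≠ [] := pvAf_ne_nil _ _ (pvSizes_ne_nil xs)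
  rw [List.dropLast_append_of_ne_nil hne, pvLastI_append _ _ hne]
  rw [List.append_assoc]
  congr 1
  -- pvAf (lastI (pvAf L S)).dropLast ++ pvAf (lastI (pvAf L S)) R  =  pvAf L (S.dropLast ++ pvAf (lastI S) R)
  cases hS : pvSizes xs with
  | nil => exact absurd hS (pvSizes_ne_nil xs)
  | cons a b =>
    cases b with
    | nil =>
      cases hy : pvSizes ys with
      | nil => exact absurd hy (pvSizes_ne_nil ys)
      | cons y yr => simp [pvAf, pvLastI, List.modifyHead]; ring
    | cons a2 b2 =>
      simp only [pvAf, List.modifyHead, pvLastI_cons_cons, List.dropLast_cons₂, List.cons_append]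

theorem pvFold_eq (enz : List Char) (rest : List (List Char)) :
    ∀ (sizes : List Int), sizes ≠ [] →
      rest.foldl (fun sz seg => pvMerge (pvMerge sz enz) seg) sizes
        = pvExt sizes ((rest.map (fun s => enz ++ s)).flatten) := by
  induction rest with
  | nil =>
    intro sizes h
    simp only [List.foldl_nil, List.map_nil, List.flatten_nil]
    unfold pvExt
    simp [pvSizes, pvAf, List.modifyHead, pvDropLast_append_lastI sizes h]
  | cons s r ih =>
    intro sizes h
    rw [List.foldl_cons, pvMerge_eq, pvMerge_eq,
        ih _ (pvExt_ne_nil _ _), pvExt_pvExt, pvExt_pvExt]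
    simp

-- ===== VERDICT (by name: the statement is the Claim_ definition above) =====
theorem calc_restrict_fragment_size_v2_spec : Claim_equal_calc_restrict_fragment_size_v2 := by
  intro dna enz _ hpre
  unfold Spec_calc_restrict_fragment_size_v2
  unfold calc_restrict_fragment_size_v2 calc_restrict_fragment_size_v2_alt
  dsimp only
  have hstar : (['*'] : List Char) ≠ [] := by simp
  rw [pvReplace_eq _ _ _ hstar, pvRep_star_filter]
  have hd : enz.toList.filter (fun c => c ≠ '*') ≠ [] := by
    unfold Pre_calc_restrict_fragment_size_v2 at hpre
    simp only [List.any_eq_true, decide_eq_true_eq] at hpre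
    obtain ⟨x, hx, hxs⟩ := hpre
    intro hnil
    have hall := List.filter_eq_nil_iff.mp hnil x hx
    simp at hall
    exact hxs hall
  -- A side
  rw [pvReplace_eq _ _ _ hd, pvSplitOn_eq_gen _ _ hstar]
  rw [PySem.List.foldl_pyRange_zero_pyGetD' _ ([] : List Char)
        (fun (size : List Int) (p : List Char) => size ++ [(PySem.Chars.len p : Int)]) []]
  rw [PySem.List.foldl_append_singleton_eq_map (fun (p : List Char) => (PySem.Chars.len p : Int))]
  simp only [PySem.Chars.len_eq]
  rw [pvMap_len_split_star, pvRep_glue]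
  -- B side
  rw [pvSplitOn_eq_gen _ _ hd]
  rw [pvMerge_eq, pvFold_eq enz.toList _ _ (pvExt_ne_nil _ _), pvExt_pvExt]
  unfold pvExt
  rw [show ([0] : List Int).dropLast = [] from rfl]
  simp only [List.nil_append, pvLastI, pvAf_zero]
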